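-- pv_equiv track=rewrite | github.com/bitflight-devops/skilllint | packages/skilllint/rules/as_series.py | _resolve_plugin_namespaced_server
-- ===== SOURCE A (Python) =====
-- def _resolve_plugin_namespaced_server(raw_segment: str, plugin_server_map: dict[str, set[str]]) -> tuple[str, str]:
--     """Resolve the actual server name from a raw mcp__ segment, handling plugin-namespaced tools.
--
--     Claude Code registers plugin MCP servers using:
--         mcp__plugin_{plugin-name}_{server-name}__{tool-name}
--
--     When the middle segment starts with ``plugin_``, this function strips the
--     ``plugin_{plugin-name}_`` prefix to recover ``{server-name}``, then validates
--     that the recovered name matches a server declared in that plugin's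
--     ``mcpServers``.  If the plugin name cannot be identified or the server is
--     not found in the matched plugin, the full raw segment is returned unchanged
--     so that normal discovery fallback handles it.
--
--     Args:
--         raw_segment: The ``parts[1]`` segment from splitting the tool name on
--             ``__``.  For user-level tools this is just the server name; for
--             plugin-level tools it is ``plugin_{plugin-name}_{server-name}``.
--         plugin_server_map: Mapping of plugin name → set of server names,
--             produced by ``_collect_plugin_names_from_ancestry``.
--
--     Returns:
--         A ``(server_name, prefix)`` tuple where ``server_name`` is the resolved
--         server name (stripped of the plugin prefix when applicable) and
--         ``prefix`` is the ``plugin_{plugin-name}_`` prefix string that was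
--         removed (empty string for user-level tools).  The prefix is needed so
--         callers can reconstruct the full tool name for error messages.
--     """
--     plugin_pfx = "plugin_"
--     if not raw_segment.startswith(plugin_pfx):
--         return raw_segment, ""
--
--     # raw_segment = "plugin_{plugin-name}_{server-name}"
--     # We must identify which plugin name to strip.  Try each known plugin name
--     # in order of descending length to avoid prefix ambiguity (e.g. plugin "dh"
--     # vs plugin "dh_backlog").
--     after_plugin = raw_segment[len(plugin_pfx) :]  # "{plugin-name}_{server-name}"
--     plugin_names = sorted(plugin_server_map.keys(), key=str.__len__, reverse=True)
--     for plugin_name in plugin_names: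
--         candidate_prefix = plugin_name + "_"
--         if after_plugin.startswith(candidate_prefix):
--             server_name = after_plugin[len(candidate_prefix) :]
--             plugin_servers: set[str] = plugin_server_map[plugin_name]
--             stripped_prefix = plugin_pfx + candidate_prefix
--             if server_name in plugin_servers:
--                 # Exact match in this plugin's mcpServers — resolved
--                 return server_name, stripped_prefix
--             # Plugin name matched but server not in its mcpServers.
--             # Still strip the prefix so case-fold lookup can find it.
--             return server_name, stripped_prefix
--
--     # Could not identify plugin name — return raw segment for fallback handling
--     return raw_segment, ""
-- ===== SOURCE B (Python) =====
-- def _resolve_plugin_namespaced_server(raw_segment: str, plugin_server_map: dict[str, set[str]]) -> tuple[str, str]: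
--     """Single pass: track the longest plugin name whose 'name_' prefixes the
--     segment after 'plugin_', instead of sorting all names by length first."""
--     if not raw_segment.startswith("plugin_"):
--         return raw_segment, ""
--     after = raw_segment[len("plugin_"):]
--     best = None
--     for name in plugin_server_map:
--         if after.startswith(name + "_") and (best is None or len(best) < len(name)):
--             best = name
--     if best is None:
--         return raw_segment, ""
--     return after[len(best) + 1:], "plugin_" + best + "_"
-- ===== Notes on version B (the rewrite author's own statement) =====
-- stated objective: alternative
-- what changed: A sorts all plugin names by descending length and returns the first whose 'name_' prefixes the segment; B makes a single unsorted pass over the map tracking the longest matching name (ties are impossible: equal-length matching prefixes are identical).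
import Mathlib
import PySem

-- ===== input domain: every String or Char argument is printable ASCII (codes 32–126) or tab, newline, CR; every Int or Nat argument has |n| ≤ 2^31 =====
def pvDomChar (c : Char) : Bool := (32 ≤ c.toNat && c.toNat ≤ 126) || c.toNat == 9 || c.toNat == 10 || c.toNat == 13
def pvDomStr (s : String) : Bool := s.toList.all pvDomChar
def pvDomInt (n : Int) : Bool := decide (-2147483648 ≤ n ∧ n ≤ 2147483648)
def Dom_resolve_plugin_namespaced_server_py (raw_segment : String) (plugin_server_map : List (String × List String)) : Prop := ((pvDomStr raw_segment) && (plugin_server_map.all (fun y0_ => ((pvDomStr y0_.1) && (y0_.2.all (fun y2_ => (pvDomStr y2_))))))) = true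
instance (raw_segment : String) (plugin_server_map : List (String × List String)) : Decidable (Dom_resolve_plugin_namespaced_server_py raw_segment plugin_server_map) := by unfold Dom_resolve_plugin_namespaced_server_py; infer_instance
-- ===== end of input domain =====

-- B replaces A's sort-names-by-length-then-first-match with a single fold tracking the longest matching name (alternative decomposition, same result).

-- ===== PORT A =====
-- A's loop over the sorted plugin names ('for plugin_name in plugin_names: …'):
def pvALoop (raw_segment : String) (plugin_server_map : List (String × List String))
    (after_plugin : String) : List String → String × String
  | [] => (raw_segment, "")                                    -- fell through: return raw_segment, ""
  | plugin_name :: rest =>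
    let candidate_prefix := PySem.Str.join "" [plugin_name, "_"]
    if PySem.Str.startswith after_plugin candidate_prefix then
      let server_name := PySem.Str.slice after_plugin (some (PySem.Str.len candidate_prefix)) none
      -- plugin_server_map[plugin_name]: first-match lookup (the key is present whenever this line runs, so the getD [] default is never used)
      let plugin_servers := ((plugin_server_map.find? (fun p => p.1 == plugin_name)).map (·.2)).getD []
      let stripped_prefix := PySem.Str.join "" ["plugin_", candidate_prefix]
      if plugin_servers.contains server_name then
        (server_name, stripped_prefix)
      else
        (server_name, stripped_prefix)
    else
      pvALoop raw_segment plugin_server_map after_plugin rest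

def resolve_plugin_namespaced_server_py (raw_segment : String) (plugin_server_map : List (String × List String)) : String × String :=
  let plugin_pfx := "plugin_"
  if ¬ PySem.Str.startswith raw_segment plugin_pfx then
    (raw_segment, "")
  else
    let after_plugin := PySem.Str.slice raw_segment (some (PySem.Str.len plugin_pfx)) none
    let plugin_names := PySem.List.sorted (plugin_server_map.map (·.1)) (fun s => PySem.Str.len s) true
    pvALoop raw_segment plugin_server_map after_plugin plugin_names

-- ===== PORT B =====
-- B's loop body: 'if after.startswith(name + "_") and (best is None or len(best) < len(name)): best = name'
def pvBStep (after : String) (best : Option String) (p : String × List String) : Option String :=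
  if PySem.Str.startswith after (PySem.Str.join "" [p.1, "_"]) &&
      (best.isNone || decide (PySem.Str.len (best.getD "") < PySem.Str.len p.1)) then
    some p.1
  else best

def resolve_plugin_namespaced_server_py_alt (raw_segment : String) (plugin_server_map : List (String × List String)) : String × String :=
  if ¬ PySem.Str.startswith raw_segment "plugin_" then
    (raw_segment, "")
  else
    let after := PySem.Str.slice raw_segment (some (PySem.Str.len "plugin_")) none
    match plugin_server_map.foldl (pvBStep after) none with
    | none => (raw_segment, "")
    | some b =>
      (PySem.Str.slice after (some (PySem.Str.len b + 1)) none, PySem.Str.join "" ["plugin_", b, "_"])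

-- ===== PRECONDITION & SPEC =====
def Spec_resolve_plugin_namespaced_server_py (raw_segment : String) (plugin_server_map : List (String × List String)) (out : String × String) : Prop := out = resolve_plugin_namespaced_server_py_alt raw_segment plugin_server_map
instance (raw_segment : String) (plugin_server_map : List (String × List String)) (out : String × String) : Decidable (Spec_resolve_plugin_namespaced_server_py raw_segment plugin_server_map out) := by unfold Spec_resolve_plugin_namespaced_server_py; infer_instance

-- ===== CLAIM (what is proved, stated in full; the proofs are below) =====
def Claim_equal_resolve_plugin_namespaced_server_py : Prop := ∀ (raw_segment : String) (plugin_server_map : List (String × List String)), Dom_resolve_plugin_namespaced_server_py raw_segment plugin_server_map → Spec_resolve_plugin_namespaced_server_py raw_segment plugin_server_map (resolve_plugin_namespaced_server_py raw_segment plugin_server_map)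

-- ===== LEMMAS AND PROOFS =====

-- the match predicate both versions test
def pvP (after k : String) : Bool := PySem.Str.startswith after (PySem.Str.join "" [k, "_"])

theorem pvJoin_toList (k : String) : (PySem.Str.join "" [k, "_"]).toList = k.toList ++ ['_'] := by
  simp [PySem.Str.join, PySem.Chars.join_cons_cons, PySem.Chars.join_singleton]

theorem pvP_prefix {after k : String} (h : pvP after k = true) : (k.toList ++ ['_']) <+: after.toList := by
  simpa [pvP, PySem.Chars.startswith_iff, pvJoin_toList k] using h

-- two matching names of equal length are the same name
theorem pvP_unique {after k1 k2 : String} (h1 : pvP after k1 = true) (h2 : pvP after k2 = true)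
    (hl : PySem.Str.len k1 = PySem.Str.len k2) : k1 = k2 := by
  have hl' : k1.toList.length = k2.toList.length := by
    simpa using hl
  have p1 := pvP_prefix h1
  have p2 := pvP_prefix h2
  have hle : (k1.toList ++ ['_']) <+: (k2.toList ++ ['_']) :=
    List.prefix_of_prefix_length_le p1 p2 (by simp [hl'])
  have := hle.eq_of_length (by simp [hl'])
  have : k1.toList = k2.toList := by simpa using this
  exact String.toList_inj.mp this

-- A's loop is find?-the-first-match over the (sorted) name list
theorem pvALoop_eq_find (raw : String) (m : List (String × List String)) (after : String)
    (l : List String) :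
    pvALoop raw m after l =
      match l.find? (pvP after) with
      | none => (raw, "")
      | some k => (PySem.Str.slice after (some (PySem.Str.len (PySem.Str.join "" [k, "_"]))) none,
                   PySem.Str.join "" ["plugin_", PySem.Str.join "" [k, "_"]]) := by
  induction l with
  | nil => simp [pvALoop]
  | cons k rest ih =>
    by_cases h : pvP after k = true
    · simp [pvALoop, pvP] at h ⊢
      simp [h, List.find?_cons_of_pos, pvP]
    · simp [pvP] at h
      simp [pvALoop, h, List.find?_cons_of_neg, pvP, ih]

-- characterization of B's fold: none ↔ nothing matched; some m → m is a longest matching name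
theorem pvFold_char (after : String) (l : List (String × List String)) : ∀ (acc : Option String),
    (l.foldl (pvBStep after) acc = none → acc = none ∧ ∀ p ∈ l, pvP after p.1 = false)
    ∧ (∀ mx, l.foldl (pvBStep after) acc = some mx →
        (acc = some mx ∨ (mx ∈ l.map (·.1) ∧ pvP after mx = true))
        ∧ (∀ p ∈ l, pvP after p.1 = true → PySem.Str.len p.1 ≤ PySem.Str.len mx)
        ∧ (∀ b, acc = some b → PySem.Str.len b ≤ PySem.Str.len mx)) := by
  induction l with
  | nil =>
    intro acc
    refine ⟨fun h => ⟨h, by simp⟩, fun mx h => ⟨Or.inl h, by simp, fun b hb => by simp_all⟩⟩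
  | cons p rest ih =>
    intro acc
    have hfold : (p :: rest).foldl (pvBStep after) acc = rest.foldl (pvBStep after) (pvBStep after acc p) := rfl
    by_cases hcond : (PySem.Str.startswith after (PySem.Str.join "" [p.1, "_"]) &&
        (acc.isNone || decide (PySem.Str.len (acc.getD "") < PySem.Str.len p.1))) = true
    · -- the step produced some p.1
      have hstep : pvBStep after acc p = some p.1 := by unfold pvBStep; rw [if_pos hcond]
      have hppm : pvP after p.1 = true := Bool.and_elim_left hcond
      constructor
      · intro h
        rw [hfold] at h
        obtain ⟨hacc', _⟩ := (ih (pvBStep after acc p)).1 h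
        rw [hstep] at hacc'; cases hacc'
      · intro mx h
        rw [hfold] at h
        obtain ⟨horig, hmax, hacc⟩ := (ih (pvBStep after acc p)).2 mx h
        have hp1le : PySem.Str.len p.1 ≤ PySem.Str.len mx := hacc p.1 hstep
        refine ⟨?_, ?_, ?_⟩
        · rcases horig with h1 | h1
          · rw [hstep] at h1
            have : p.1 = mx := Option.some_inj.mp h1
            subst this
            exact Or.inr ⟨by simp, hppm⟩
          · exact Or.inr ⟨by simp [List.mem_map] at h1 ⊢; exact Or.inr h1.1, h1.2⟩
        · intro q hq hPq
          rcases List.mem_cons.mp hq with rfl | hq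
          · exact hp1le
          · exact hmax q hq hPq
        · intro b hb
          subst hb
          have hBor := Bool.and_elim_right hcond
          simp only [Option.isNone_some, Bool.false_or, Option.getD_some, decide_eq_true_eq] at hBor
          exact le_trans (le_of_lt hBor) hp1le
    · -- the step kept acc
      have hstep : pvBStep after acc p = acc := by unfold pvBStep; rw [if_neg hcond]
      constructor
      · intro h
        rw [hfold] at h
        obtain ⟨hacc', hrest⟩ := (ih (pvBStep after acc p)).1 h
        rw [hstep] at hacc'
        subst hacc'
        refine ⟨rfl, ?_⟩
        intro q hq
        rcases List.mem_cons.mp hq with rfl | hq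
        · simp only [Option.isNone_none, Bool.true_or, Bool.and_true] at hcond
          exact Bool.eq_false_iff.mpr hcond
        · exact hrest q hq
      · intro mx h
        rw [hfold] at h
        obtain ⟨horig, hmax, hacc⟩ := (ih (pvBStep after acc p)).2 mx h
        rw [hstep] at horig hacc
        refine ⟨?_, ?_, hacc⟩
        · rcases horig with h1 | h1
          · exact Or.inl h1
          · refine Or.inr ⟨?_, h1.2⟩
            simp only [List.map_cons, List.mem_cons]
            exact Or.inr (by simpa using h1.1)
        · intro q hq hPq
          rcases List.mem_cons.mp hq with rfl | hq
          · -- q matches but the condition failed: acc = some b with len q.1 ≤ len b ≤ len mx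
            have hst : PySem.Str.startswith after (PySem.Str.join "" [q.1, "_"]) = true := hPq
            have hB : ¬ (acc.isNone || decide (PySem.Str.len (acc.getD "") < PySem.Str.len q.1)) = true :=
              fun hb => hcond (by rw [hst, hb]; rfl)
            simp only [Bool.or_eq_true, Option.isNone_iff_eq_none, decide_eq_true_eq, not_or] at hB
            cases hb : acc with
            | none => exact absurd hb hB.1
            | some b =>
              have hnlt := hB.2
              rw [hb] at hnlt
              simp only [Option.getD_some] at hnlt
              exact le_trans (not_lt.mp hnlt) (hacc b hb)
          · exact hmax q hq hPq

-- characterization of A's find?-over-sorted: none → nothing matched; some k → k is a longest matching name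
theorem pvFind_char (after : String) (names : List String) :
    ((PySem.List.sorted names (fun s => PySem.Str.len s) true).find? (pvP after) = none →
      ∀ k ∈ names, pvP after k = false)
    ∧ (∀ k, (PySem.List.sorted names (fun s => PySem.Str.len s) true).find? (pvP after) = some k →
        k ∈ names ∧ pvP after k = true ∧
        ∀ k' ∈ names, pvP after k' = true → PySem.Str.len k' ≤ PySem.Str.len k) := by
  constructor
  · intro h k hk
    have : k ∈ PySem.List.sorted names (fun s => PySem.Str.len s) true :=
      (PySem.List.mem_sorted _ _ _ _).mpr hk
    have := List.find?_eq_none.mp h k this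
    simpa using this
  · intro k h
    obtain ⟨hPk, as, bs, hsplit, has⟩ := List.find?_eq_some_iff_append.mp h
    have hmemk : k ∈ PySem.List.sorted names (fun s => PySem.Str.len s) true := by
      rw [hsplit]; simp
    refine ⟨(PySem.List.mem_sorted _ _ _ _).mp hmemk, hPk, ?_⟩
    intro k' hk' hPk'
    have hmem' : k' ∈ PySem.List.sorted names (fun s => PySem.Str.len s) true :=
      (PySem.List.mem_sorted _ _ _ _).mpr hk'
    rw [hsplit] at hmem'
    have hpw := PySem.List.sorted_pairwise_rev names (fun s => PySem.Str.len s)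
    rw [hsplit] at hpw
    rcases List.mem_append.mp hmem' with hin | hin
    · have := has k' hin
      simp [hPk'] at this
    · rcases List.mem_cons.mp hin with rfl | hin
      · exact le_refl _
      · have hsub : List.Sublist (k :: bs) (as ++ k :: bs) := List.sublist_append_right as _
        exact List.rel_of_pairwise_cons (List.Pairwise.sublist hsub hpw) hin

theorem resolve_plugin_namespaced_server_py_spec : Claim_equal_resolve_plugin_namespaced_server_py := by
  intro raw m _
  unfold Spec_resolve_plugin_namespaced_server_py
  unfold resolve_plugin_namespaced_server_py resolve_plugin_namespaced_server_py_alt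
  by_cases h : PySem.Str.startswith raw "plugin_" = true
  · simp only [h, not_true_eq_false, ite_false]
    set after := PySem.Str.slice raw (some (PySem.Str.len "plugin_")) none with hafter
    rw [pvALoop_eq_find]
    have hfold := pvFold_char after m none
    have hfind := pvFind_char after (m.map (·.1))
    cases hF : (PySem.List.sorted (m.map (·.1)) (fun s => PySem.Str.len s) true).find? (pvP after) with
    | none =>
      cases hB : m.foldl (pvBStep after) none with
      | none => simp
      | some mx =>
        obtain ⟨horig, _, _⟩ := (hfold).2 mx hB
        rcases horig with h1 | h1
        · cases h1
        · have := hfind.1 hF mx h1.1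
          rw [h1.2] at this; cases this
    | some k =>
      obtain ⟨hkmem, hPk, hkmax⟩ := hfind.2 k hF
      cases hB : m.foldl (pvBStep after) none with
      | none =>
        obtain ⟨_, hnone⟩ := (hfold).1 hB
        obtain ⟨p, hp, rfl⟩ := List.mem_map.mp hkmem
        have := hnone p hp
        rw [hPk] at this; cases this
      | some mx =>
        obtain ⟨horig, hmxmax, _⟩ := (hfold).2 mx hB
        rcases horig with h1 | h1
        · cases h1
        · obtain ⟨hmxmem, hPmx⟩ := h1
          have hle1 : PySem.Str.len mx ≤ PySem.Str.len k := hkmax mx hmxmem hPmx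
          have hle2 : PySem.Str.len k ≤ PySem.Str.len mx := by
            obtain ⟨p, hp, rfl⟩ := List.mem_map.mp hkmem
            exact hmxmax p hp hPk
          have hkmx : k = mx := pvP_unique hPk hPmx (le_antisymm hle2 hle1)
          subst hkmx
          -- the two output pairs coincide
          have hlen : PySem.Str.len (PySem.Str.join "" [k, "_"]) = PySem.Str.len k + 1 := by
            simp [PySem.Str.join, PySem.Chars.join_cons_cons, PySem.Chars.join_singleton]
          refine Prod.ext ?_ ?_
          · simp only
            rw [hlen]
          · simp only
            apply String.toList_inj.mp
            simp [PySem.Str.join, PySem.Chars.join_cons_cons, PySem.Chars.join_singleton]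
  · have h' : PySem.Chars.startswith raw.toList ['p','l','u','g','i','n','_'] = false := by
      simpa using Bool.eq_false_iff.mpr h
    simp [h']

-- ===== VERDICT (by name: the statement is the Claim_ definition above) =====
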